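-- pv_equiv track=rewrite | github.com/proofgrammers/www.proofgrammers.com | slides/teams/teamsix/week9/pure_python.py | lastTtoA_pure_python_v3
-- ===== SOURCE A (Python) =====
-- def lastTtoA_pure_python_v3(dna_string):
--     """
--     Implementation using enumerate and reversed iteration.
--
--     Algorithm:
--     1. Iterate through string in reverse order with enumerate
--     2. Find the first (last in original order) occurrence of 'T'
--     3. Calculate original index and reconstruct string
--
--     Time Complexity: O(n)
--     Space Complexity: O(n)
--
--     Args:
--         dna_string (str): DNA string containing only A, C, T, G
--
--     Returns:
--         str: Modified string with last T replaced by A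
--     """
--     if not dna_string:
--         return dna_string
--
--     # Find last 'T' using reversed enumeration
--     for i, char in enumerate(reversed(dna_string)):
--         if char == 'T':
--             # Calculate the original index
--             original_index = len(dna_string) - 1 - i
--             # Reconstruct string with replacement
--             return dna_string[:original_index] + 'A' + dna_string[original_index + 1:]
--
--     # No 'T' found, return original string
--     return dna_string
-- ===== SOURCE B (Python) =====
-- def lastTtoA_pure_python_v3(dna_string):
--     # Forward two-stage approach: count all 'T's, then a single forward scan
--     # replaces the occurrence whose running count equals the total (= the last one).
--     total = dna_string.count('T')
--     if total == 0:
--         return dna_string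
--     out = []
--     seen = 0
--     for ch in dna_string:
--         if ch == 'T':
--             seen += 1
--             out.append('A' if seen == total else ch)
--         else:
--             out.append(ch)
--     return ''.join(out)
-- ===== Notes on version B (the rewrite author's own statement) =====
-- stated objective: alternative
-- what changed: Replaces A's backward search for the last 'T' plus slice-and-concatenate rebuild by a forward strategy: count the 'T's with a C-level str.count first, then one forward pass with a running occurrence counter that rewrites exactly the occurrence whose rank equals the total.
import Mathlib
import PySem

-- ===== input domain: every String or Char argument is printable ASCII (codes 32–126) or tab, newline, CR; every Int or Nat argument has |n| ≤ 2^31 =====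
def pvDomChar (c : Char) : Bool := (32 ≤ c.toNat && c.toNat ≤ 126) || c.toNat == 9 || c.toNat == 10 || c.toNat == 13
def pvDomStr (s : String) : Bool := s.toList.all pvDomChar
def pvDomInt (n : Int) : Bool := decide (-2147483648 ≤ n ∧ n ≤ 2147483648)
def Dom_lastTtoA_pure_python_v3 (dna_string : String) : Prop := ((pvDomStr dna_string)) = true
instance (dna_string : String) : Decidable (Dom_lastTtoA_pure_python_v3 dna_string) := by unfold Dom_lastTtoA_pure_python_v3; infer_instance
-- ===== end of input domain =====

-- B replaces A's backward search + slice rebuild by a forward strategy: count the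
-- 'T's, then one forward pass replacing the occurrence whose rank equals the total.

-- ===== PORT A =====
-- the 'for i, char in enumerate(reversed(dna_string))' loop: cs is the remaining
-- reversed suffix, i the enumerate counter
def pvALoop (s : String) (i : Int) : List Char → String
  | [] => s                                   -- loop ends: no 'T' found, return original
  | c :: cs =>
      if c = 'T' then
        -- original_index = len(dna_string) - 1 - i
        let oi : Int := PySem.Str.len s - 1 - i
        -- dna_string[:oi] + 'A' + dna_string[oi+1:]
        String.ofList (PySem.List.slice s.toList none (some oi) ++
                   'A' :: PySem.List.slice s.toList (some (oi + 1)) none)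
      else pvALoop s (i + 1) cs

def lastTtoA_pure_python_v3 (dna_string : String) : String :=
  if dna_string.toList = [] then dna_string     -- if not dna_string: return dna_string
  else pvALoop dna_string 0 dna_string.toList.reverse

-- ===== PORT B =====
-- the forward 'for ch in dna_string' loop of Source B: seen = running count of 'T's,
-- total = dna_string.count('T'); builds the output character list
def pvBLoop : List Char → Nat → Nat → List Char
  | [], _, _ => []
  | c :: cs, seen, total =>
      if c = 'T' then
        (if seen + 1 = total then 'A' else c) :: pvBLoop cs (seen + 1) total
      else c :: pvBLoop cs seen total

def lastTtoA_pure_python_v3_alt (dna_string : String) : String :=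
  let total := dna_string.toList.count 'T'     -- dna_string.count('T')
  if total = 0 then dna_string
  else String.ofList (pvBLoop dna_string.toList 0 total)

-- ===== PRECONDITION & SPEC =====
def Spec_lastTtoA_pure_python_v3 (dna_string : String) (out : String) : Prop := out = lastTtoA_pure_python_v3_alt dna_string
instance (dna_string : String) (out : String) : Decidable (Spec_lastTtoA_pure_python_v3 dna_string out) := by unfold Spec_lastTtoA_pure_python_v3; infer_instance

-- ===== CLAIM (what is proved, stated in full; the proofs are below) =====
def Claim_equal_lastTtoA_pure_python_v3 : Prop := ∀ (dna_string : String), Dom_lastTtoA_pure_python_v3 dna_string → Spec_lastTtoA_pure_python_v3 dna_string (lastTtoA_pure_python_v3 dna_string)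

-- ===== LEMMAS AND PROOFS =====
theorem pvALoop_no_T (s : String) (i : Int) (cs : List Char) (h : 'T' ∉ cs) :
    pvALoop s i cs = s := by
  induction cs generalizing i with
  | nil => rfl
  | cons c cs ih =>
      have hc : c ≠ 'T' := fun hc => h (hc ▸ List.mem_cons_self)
      simp only [pvALoop, if_neg hc]
      exact ih (i + 1) (fun hm => h (List.mem_cons_of_mem _ hm))

theorem pvALoop_found (s : String) (i : Int) (p q : List Char) (h : 'T' ∉ p) :
    pvALoop s i (p ++ 'T' :: q) =
      String.ofList (PySem.List.slice s.toList none (some (PySem.Str.len s - 1 - (i + p.length))) ++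
        'A' :: PySem.List.slice s.toList (some (PySem.Str.len s - 1 - (i + p.length) + 1)) none) := by
  induction p generalizing i with
  | nil => simp [pvALoop]
  | cons c p ih =>
      have hc : c ≠ 'T' := fun hc => h (hc ▸ List.mem_cons_self)
      simp only [List.cons_append, pvALoop, if_neg hc]
      rw [ih (i + 1) (fun hm => h (List.mem_cons_of_mem _ hm))]
      simp only [List.length_cons]
      push_cast
      ring_nf

theorem pvDropWhile_head_T {l : List Char} {c : Char} {q : List Char}
    (h : l.dropWhile (fun x => x ≠ 'T') = c :: q) : c = 'T' := by
  induction l with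
  | nil => simp at h
  | cons a l ih =>
      by_cases ha : a = 'T'
      · rw [List.dropWhile_cons, if_neg (by simp [ha])] at h
        injection h with h1 _
        exact h1 ▸ ha
      · simp only [List.dropWhile_cons, decide_eq_true_eq] at h
        rw [if_pos (by simpa using ha)] at h
        exact ih h

theorem pvBLoop_no_T (v : List Char) (a t : Nat) (h : 'T' ∉ v) :
    pvBLoop v a t = v := by
  induction v generalizing a with
  | nil => rfl
  | cons c cs ih =>
      have hc : c ≠ 'T' := fun hc => h (hc ▸ List.mem_cons_self)
      simp only [pvBLoop, if_neg hc]
      exact congrArg (c :: ·) (ih a (fun hm => h (List.mem_cons_of_mem _ hm)))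

theorem pvBLoop_last (u v : List Char) (seen : Nat) (h : 'T' ∉ v) :
    pvBLoop (u ++ 'T' :: v) seen (seen + u.count 'T' + 1) = u ++ 'A' :: v := by
  induction u generalizing seen with
  | nil =>
      simp only [List.nil_append, List.count_nil, pvBLoop, Nat.add_zero]
      exact congrArg (fun l => 'A' :: l) (pvBLoop_no_T v (seen + 1) _ h)
  | cons c u ih =>
      by_cases hc : c = 'T'
      · subst hc
        rw [List.count_cons_self,
          show seen + (u.count 'T' + 1) + 1 = (seen + 1) + u.count 'T' + 1 from by omega,
          List.cons_append]
        have hne : ¬ (seen + 1 = (seen + 1) + u.count 'T' + 1) := by omega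
        simp only [pvBLoop, if_neg hne]
        exact congrArg ('T' :: ·) (ih (seen + 1))
      · rw [List.count_cons_of_ne (by simpa using hc), List.cons_append]
        simp only [pvBLoop, if_neg hc]
        exact congrArg (c :: ·) (ih seen)

theorem lastTtoA_pure_python_v3_eq (s : String) :
    lastTtoA_pure_python_v3 s = lastTtoA_pure_python_v3_alt s := by
  unfold lastTtoA_pure_python_v3 lastTtoA_pure_python_v3_alt
  set r := s.toList.reverse with hr
  by_cases hT : 'T' ∈ s.toList
  · -- there is a 'T'
    have hTr : 'T' ∈ r := by simpa [hr] using hT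
    have hne : r.dropWhile (fun c => c ≠ 'T') ≠ [] := by
      intro hnil
      rw [List.dropWhile_eq_nil_iff] at hnil
      have := hnil 'T' hTr
      simp at this
    obtain ⟨c, q, hd⟩ := List.exists_cons_of_ne_nil hne
    have hcT : c = 'T' := pvDropWhile_head_T hd
    subst hcT
    set p := r.takeWhile (fun c => c ≠ 'T') with hp
    have hpT : 'T' ∉ p := by
      intro hm
      have := List.mem_takeWhile_imp hm
      simp at this
    have hsplit : r = p ++ 'T' :: q := by rw [hp, ← hd]; exact (List.takeWhile_append_dropWhile).symm
    rw [if_neg (by intro h0; rw [h0] at hT; simp at hT)]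
    conv_lhs => rw [hsplit]
    rw [pvALoop_found s 0 p q hpT]
    have hlist : s.toList = q.reverse ++ 'T' :: p.reverse := by
      have : r.reverse = s.toList := by simp [hr]
      rw [← this, hsplit]
      simp
    have hlen : s.toList.length = q.length + 1 + p.length := by
      rw [hlist]; simp; omega
    have hoi : PySem.Str.len s - 1 - (0 + (p.length : Int)) = (q.length : Int) := by
      simp [PySem.Str.len_eq, hlen]; omega
    rw [hoi]
    have h1 : PySem.List.slice s.toList none (some ((q.length : Nat) : Int)) = s.toList.take q.length := by
      simp [pysem]
    have h3 : PySem.List.slice s.toList (some ((q.length : Int) + 1)) none = s.toList.drop (q.length + 1) := by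
      rw [show ((q.length : Int) + 1) = ((q.length + 1 : Nat) : Int) by omega]
      rw [PySem.List.slice_some_none, PySem.List.clampIdx_natCast]
      rw [Nat.min_eq_left (by omega)]
    have hpvT : 'T' ∉ p.reverse := by simpa using hpT
    have hp0 : p.count 'T' = 0 := List.count_eq_zero_of_not_mem hpT
    have hprev0 : p.reverse.count 'T' = 0 := by simpa using hp0
    have hcnt : (q.reverse ++ 'T' :: p.reverse).count 'T' = q.reverse.count 'T' + 1 := by
      simp [List.count_append, hprev0]
    have hB : pvBLoop (q.reverse ++ 'T' :: p.reverse) 0 (q.reverse.count 'T' + 1) = q.reverse ++ 'A' :: p.reverse := by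
      have h0 := pvBLoop_last q.reverse p.reverse 0 hpvT
      simpa using h0
    rw [h1, h3, hlist]
    rw [List.take_append, List.drop_append]
    rw [List.take_of_length_le (by simp), List.drop_eq_nil_of_le (by simp)]
    rw [if_neg (by omega), hcnt, hB]
    simp
  · -- no 'T': both return s unchanged
    have hcount : s.toList.count 'T' = 0 := List.count_eq_zero_of_not_mem hT
    rw [if_pos hcount]
    split_ifs with h0
    · rfl
    · exact pvALoop_no_T s 0 r (by simpa [hr] using hT)

-- ===== VERDICT (by name: the statement is the Claim_ definition above) =====
theorem lastTtoA_pure_python_v3_spec : Claim_equal_lastTtoA_pure_python_v3 := by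
  intro s _
  unfold Spec_lastTtoA_pure_python_v3
  exact lastTtoA_pure_python_v3_eq s
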